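-- pv_equiv track=rewrite | github.com/ncsu-landscape-dynamics/pathways-simulation | pathways/shipments.py | _infested_stems_to_cluster_sizes
-- ===== SOURCE A (Python) =====
-- def _infested_stems_to_cluster_sizes(infested_stems, max_infested_stems_per_cluster):
--     """Get list of cluster sizes for a given number of infested stems
--
--     The size of each cluster is limited by max_infested_stems_per_cluster.
--     """
--     if infested_stems > max_infested_stems_per_cluster:
--         # Split into n clusters so that n-1 clusters have the max size and
--         # the last one has the remaining stems.
--         # Alternative would be sth like round(infested_stems/max_infested_stems_per_cluster)
--         sum_stems = 0
--         cluster_sizes = []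
--         while sum_stems < infested_stems - max_infested_stems_per_cluster:
--             sum_stems += max_infested_stems_per_cluster
--             cluster_sizes.append(max_infested_stems_per_cluster)
--         # add remaining stems
--         cluster_sizes.append(infested_stems - sum_stems)
--         sum_stems += infested_stems - sum_stems
--         assert sum_stems == infested_stems
--     else:
--         cluster_sizes = [infested_stems]
--     return cluster_sizes
-- ===== SOURCE B (Python) =====
-- def _infested_stems_to_cluster_sizes(infested_stems, max_infested_stems_per_cluster):
--     """Get list of cluster sizes for a given number of infested stems.
--
--     Closed form: k full clusters of the max size, plus the nonempty remainder.
--     """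
--     if infested_stems > max_infested_stems_per_cluster:
--         k = (infested_stems - 1) // max_infested_stems_per_cluster
--         return [max_infested_stems_per_cluster] * k + [
--             infested_stems - k * max_infested_stems_per_cluster
--         ]
--     return [infested_stems]
-- ===== Notes on version B (the rewrite author's own statement) =====
-- stated objective: simpler
-- what changed: Replaces the accumulating while-loop with a closed-form integer-division count of full clusters: k = (n-1)//m full clusters of size m plus the remainder, so the list is built directly instead of appended one cluster per iteration.
import Mathlib
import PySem

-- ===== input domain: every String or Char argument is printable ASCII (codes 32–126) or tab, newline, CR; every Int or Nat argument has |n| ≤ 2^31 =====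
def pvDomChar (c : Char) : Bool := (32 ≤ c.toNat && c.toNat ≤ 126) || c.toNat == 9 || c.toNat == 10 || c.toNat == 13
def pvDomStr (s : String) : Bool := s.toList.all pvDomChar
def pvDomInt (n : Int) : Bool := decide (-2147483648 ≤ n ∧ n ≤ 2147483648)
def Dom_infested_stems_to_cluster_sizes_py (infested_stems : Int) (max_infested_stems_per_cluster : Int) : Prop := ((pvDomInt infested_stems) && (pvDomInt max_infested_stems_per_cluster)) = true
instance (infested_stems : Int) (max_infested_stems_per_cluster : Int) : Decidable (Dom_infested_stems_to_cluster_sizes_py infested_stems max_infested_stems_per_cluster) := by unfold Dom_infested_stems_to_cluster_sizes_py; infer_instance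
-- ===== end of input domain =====

-- B replaces A's accumulating while-loop by closed-form integer division (simpler; return value only).

-- ===== PORT A =====
-- The while-loop of A: state (sum_stems, cluster_sizes). The '0 < m' conjunct only
-- makes the recursion total: for m ≤ 0 (with sum < n - m) the Python loop diverges,
-- which Pre_ excludes; Python never reaches that state under Pre_.
def pvLoopA (n m : Int) (sum : Int) (acc : List Int) : Int × List Int :=
  if _h : sum < n - m ∧ 0 < m then
    pvLoopA n m (sum + m) (acc ++ [m])
  else (sum, acc)
termination_by (n - m - sum).toNat
decreasing_by omega

def infested_stems_to_cluster_sizes_py (infested_stems : Int) (max_infested_stems_per_cluster : Int) : List Int :=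
  if infested_stems > max_infested_stems_per_cluster then
    let r := pvLoopA infested_stems max_infested_stems_per_cluster 0 []
    -- append remaining stems (the final 'sum_stems +=' and assert do not affect the result)
    r.2 ++ [infested_stems - r.1]
  else [infested_stems]

-- ===== PORT B =====
def infested_stems_to_cluster_sizes_py_alt (infested_stems : Int) (max_infested_stems_per_cluster : Int) : List Int :=
  if infested_stems > max_infested_stems_per_cluster then
    let k := PySem.Int.floordiv (infested_stems - 1) max_infested_stems_per_cluster
    List.replicate k.toNat max_infested_stems_per_cluster ++
      [infested_stems - k * max_infested_stems_per_cluster]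
  else [infested_stems]

-- ===== PRECONDITION & SPEC =====
-- Pre_ excludes exactly the inputs on which A never returns: with
-- infested_stems > max_infested_stems_per_cluster ≤ 0 the while-loop makes no progress
-- (sum_stems never grows) and Python A diverges.
def Pre_infested_stems_to_cluster_sizes_py (infested_stems : Int) (max_infested_stems_per_cluster : Int) : Prop :=
  infested_stems ≤ max_infested_stems_per_cluster ∨ 0 < max_infested_stems_per_cluster
instance (infested_stems : Int) (max_infested_stems_per_cluster : Int) : Decidable (Pre_infested_stems_to_cluster_sizes_py infested_stems max_infested_stems_per_cluster) := by unfold Pre_infested_stems_to_cluster_sizes_py; infer_instance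

def pvWitness_infested_stems_to_cluster_sizes_py : Int × Int := (7, 3)

def Spec_infested_stems_to_cluster_sizes_py (infested_stems : Int) (max_infested_stems_per_cluster : Int) (out : List Int) : Prop := out = infested_stems_to_cluster_sizes_py_alt infested_stems max_infested_stems_per_cluster
instance (infested_stems : Int) (max_infested_stems_per_cluster : Int) (out : List Int) : Decidable (Spec_infested_stems_to_cluster_sizes_py infested_stems max_infested_stems_per_cluster out) := by unfold Spec_infested_stems_to_cluster_sizes_py; infer_instance

-- ===== CLAIM =====
def Claim_equal_infested_stems_to_cluster_sizes_py : Prop := ∀ (infested_stems : Int) (max_infested_stems_per_cluster : Int), Dom_infested_stems_to_cluster_sizes_py infested_stems max_infested_stems_per_cluster → Pre_infested_stems_to_cluster_sizes_py infested_stems max_infested_stems_per_cluster → Spec_infested_stems_to_cluster_sizes_py infested_stems max_infested_stems_per_cluster (infested_stems_to_cluster_sizes_py infested_stems max_infested_stems_per_cluster)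

-- ===== LEMMAS AND PROOFS =====

-- Loop characterisation: with 0 < m and sum still below n - m, the loop performs
-- exactly c = (n - sum - 1) / m more iterations (Euclidean '/' = floor for 0 < m).
theorem pvLoopA_spec (n m : Int) (hm : 0 < m) :
    ∀ sum acc, sum < n - m →
      pvLoopA n m sum acc =
        (sum + m * ((n - sum - 1) / m),
         acc ++ List.replicate ((n - sum - 1) / m).toNat m) := by
  intro sum acc hlt
  induction sum, acc using pvLoopA.induct n m with
  | case1 sum acc h ih =>
    rw [pvLoopA, dif_pos h]
    by_cases h2 : sum + m < n - m
    · rw [ih h2]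
      have hc : (n - (sum + m) - 1) / m = (n - sum - 1) / m - 1 := by
        have : n - (sum + m) - 1 = (n - sum - 1) + (-1) * m := by ring
        rw [this, Int.add_mul_ediv_right _ _ (by omega : m ≠ 0)]
        ring
      have hge : 1 ≤ (n - sum - 1) / m := by
        have := Int.le_ediv_iff_mul_le (a := 1) (b := n - sum - 1) hm
        omega
      rw [Prod.mk.injEq]
      constructor
      · rw [hc]; ring
      · have : List.replicate ((n - sum - 1) / m).toNat m
            = m :: List.replicate ((n - (sum + m) - 1) / m).toNat m := by
          rw [hc]
          have : ((n - sum - 1) / m).toNat = ((n - sum - 1) / m - 1).toNat + 1 := by omega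
          rw [this, List.replicate_succ]
        rw [this]; simp
    · -- last iteration: c = 1
      rw [pvLoopA, dif_neg (by omega)]
      have hc : (n - sum - 1) / m = 1 := by
        rw [← PySem.Int.floordiv_eq_ediv_of_pos hm,
          PySem.Int.floordiv_eq_iff_of_pos hm]
        constructor <;> omega
      rw [hc, Prod.mk.injEq]; constructor
      · ring
      · simp
  | case2 sum acc h =>
    exact absurd ⟨hlt, hm⟩ h

-- ===== VERDICT =====
theorem infested_stems_to_cluster_sizes_py_spec : Claim_equal_infested_stems_to_cluster_sizes_py := by
  intro n m _ hpre
  unfold Spec_infested_stems_to_cluster_sizes_py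
  unfold infested_stems_to_cluster_sizes_py infested_stems_to_cluster_sizes_py_alt
  by_cases hgt : n > m
  · have hm : 0 < m := by rcases hpre with h | h <;> omega
    rw [if_pos hgt, if_pos hgt]
    rw [pvLoopA_spec n m hm 0 [] (by omega)]
    rw [PySem.Int.floordiv_eq_ediv_of_pos hm]
    simp only [List.nil_append]
    have : n - 0 - 1 = n - 1 := by ring
    rw [this]
    congr 1
    congr 1
    ring
  · rw [if_neg hgt, if_neg hgt]
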